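-- pv_equiv track=rewrite | github.com/RAJ8664/Leetcode | 4286-valid-digit-number/4286-valid-digit-number.py | validDigit
-- ===== SOURCE A (Python) =====
-- def validDigit(n: int, x: int) -> bool:
--     last, found = -1, 0
--     while n > 0:
--         if n % 10 == x:
--             found = 1
--         last = n % 10
--         n = n // 10
--     if last != x and found == 1:
--         return True
--     return  False
-- ===== SOURCE B (Python) =====
-- def validDigit(n: int, x: int) -> bool:
--     if n <= 0:
--         return False
--     s = str(n)
--     t = str(x)
--     return s[0] != t and any(c == t for c in s[1:])
-- ===== Notes on version B (the rewrite author's own statement) =====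
-- stated objective: idiomatic
-- what changed: Replaces A's arithmetic while-loop with mod/floordiv digit extraction and last/found flag state by a single pass over str(n): the leading digit is s[0] and the rest is scanned character-wise for str(x).
import Mathlib
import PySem

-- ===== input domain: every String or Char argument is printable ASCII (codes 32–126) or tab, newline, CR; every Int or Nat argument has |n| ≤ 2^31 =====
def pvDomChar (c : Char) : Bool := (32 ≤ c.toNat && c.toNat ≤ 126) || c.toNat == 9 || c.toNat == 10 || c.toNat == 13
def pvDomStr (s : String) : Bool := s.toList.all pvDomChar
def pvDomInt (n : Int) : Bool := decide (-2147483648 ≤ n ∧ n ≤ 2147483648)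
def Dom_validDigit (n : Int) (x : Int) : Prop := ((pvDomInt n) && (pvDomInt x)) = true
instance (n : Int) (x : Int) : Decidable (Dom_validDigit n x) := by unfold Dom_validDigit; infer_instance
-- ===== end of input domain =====

-- B re-implements A's arithmetic digit loop by scanning str(n) once (idiomatic); equal on all inputs, no precondition.

-- ===== PORT A =====
-- the 'while n > 0' loop of A: state (n, last, found); returns (last, found)
def validDigitLoop (x n last found : Int) : Int × Int :=
  if h : 0 < n then
    validDigitLoop x (PySem.Int.floordiv n 10) (PySem.Int.mod n 10)
      (if PySem.Int.mod n 10 = x then 1 else found)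
  else (last, found)
termination_by n.toNat
decreasing_by
  have h1 : PySem.Int.floordiv n 10 = ((n.toNat / 10 : Nat) : Int) := by
    have h2 : n = ((n.toNat : Nat) : Int) := by omega
    rw [h2]; exact_mod_cast PySem.Int.floordiv_natCast n.toNat 10
  rw [h1]
  simp only [Int.toNat_natCast]
  exact Nat.div_lt_self (by omega) (by norm_num)

def validDigit (n : Int) (x : Int) : Bool :=
  let r := validDigitLoop x n (-1) 0
  if r.1 ≠ x ∧ r.2 = 1 then true else false

-- ===== PORT B =====
-- B: s = str(n), t = str(x); guard n <= 0; s[0] != t and any(c == t for c in s[1:])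
def validDigit_alt (n : Int) (x : Int) : Bool :=
  if n ≤ 0 then false
  else
    let t := PySem.Int.toStr x
    match (PySem.Int.toStr n).toList with
    | [] => false  -- unreachable: str(n) of a positive n is never empty
    | c :: rest => (String.ofList [c] != t) && rest.any (fun d => String.ofList [d] == t)

-- ===== PRECONDITION & SPEC =====
def Spec_validDigit (n : Int) (x : Int) (out : Bool) : Prop := out = validDigit_alt n x
instance (n : Int) (x : Int) (out : Bool) : Decidable (Spec_validDigit n x out) := by unfold Spec_validDigit; infer_instance

-- ===== CLAIM (what is proved, stated in full; the proofs are below) =====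
def Claim_equal_validDigit : Prop := ∀ (n : Int) (x : Int), Dom_validDigit n x → Spec_validDigit n x (validDigit n x)

-- ===== LEMMAS AND PROOFS =====

-- big-endian decimal digits of m (always nonempty; [0] at m = 0)
def digitsBE (m : Nat) : List Nat :=
  if m < 10 then [m] else digitsBE (m / 10) ++ [m % 10]
termination_by m
decreasing_by exact Nat.div_lt_self (by omega) (by norm_num)

-- leading decimal digit of m
def leadDigit (m : Nat) : Nat :=
  if m < 10 then m else leadDigit (m / 10)
termination_by m
decreasing_by exact Nat.div_lt_self (by omega) (by norm_num)

lemma digitsBE_ne_nil (m : Nat) : digitsBE m ≠ [] := by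
  rw [digitsBE]; split <;> simp

lemma digitsBE_ge_ten {m : Nat} (h : ¬ m < 10) :
    digitsBE m = digitsBE (m / 10) ++ [m % 10] := by
  conv_lhs => rw [digitsBE]
  rw [if_neg h]

lemma leadDigit_ge_ten {m : Nat} (h : ¬ m < 10) : leadDigit m = leadDigit (m / 10) := by
  conv_lhs => rw [leadDigit]
  rw [if_neg h]

lemma digitsBE_lt (m : Nat) : ∀ d ∈ digitsBE m, d < 10 := by
  induction m using Nat.strong_induction_on with
  | _ m ih =>
    rw [digitsBE]
    split
    · next h => intro d hd; simp at hd; omega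
    · next h =>
      intro d hd
      simp only [List.mem_append, List.mem_singleton] at hd
      rcases hd with hd | hd
      · exact ih (m / 10) (Nat.div_lt_self (by omega) (by norm_num)) d hd
      · omega

lemma digitsBE_cons (m : Nat) : ∃ rest, digitsBE m = leadDigit m :: rest := by
  induction m using Nat.strong_induction_on with
  | _ m ih =>
    rw [digitsBE, leadDigit]
    split
    · exact ⟨[], rfl⟩
    · next h =>
      obtain ⟨r, hr⟩ := ih (m / 10) (Nat.div_lt_self (by omega) (by norm_num))
      exact ⟨r ++ [m % 10], by rw [hr]; simp⟩

lemma digitsBE_singleton (m e : Nat) : digitsBE m = [e] ↔ (m < 10 ∧ e = m) := by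
  rw [digitsBE]
  split
  · next h => simp [eq_comm, h]
  · next h =>
    constructor
    · intro heq
      exfalso
      cases hf : digitsBE (m / 10) with
      | nil => exact digitsBE_ne_nil _ hf
      | cons a l => rw [hf] at heq; simp at heq
    · intro ⟨h1, _⟩; omega

lemma validDigitLoop_eq (x : Int) : ∀ (m : Nat), 0 < m → ∀ (last found : Int),
    validDigitLoop x (m : Int) last found =
      ((leadDigit m : Int),
        if (digitsBE m).any (fun d => decide ((d : Int) = x)) then 1 else found) := by
  intro m
  induction m using Nat.strong_induction_on with
  | _ m ih =>
    intro hm last found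
    have hfd : PySem.Int.floordiv (m : Int) 10 = ((m / 10 : Nat) : Int) := by
      exact_mod_cast PySem.Int.floordiv_natCast m 10
    have hmd : PySem.Int.mod (m : Int) 10 = ((m % 10 : Nat) : Int) := by
      exact_mod_cast PySem.Int.mod_natCast m 10
    rw [validDigitLoop, dif_pos (by exact_mod_cast hm), hfd, hmd]
    by_cases h10 : m < 10
    · have hq : m / 10 = 0 := Nat.div_eq_of_lt h10
      have hr : m % 10 = m := Nat.mod_eq_of_lt h10
      rw [hq, hr, validDigitLoop, dif_neg (by norm_num)]
      rw [digitsBE, if_pos h10, leadDigit, if_pos h10]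
      simp
    · have hqpos : 0 < m / 10 := Nat.div_pos (by omega) (by norm_num)
      rw [ih (m / 10) (Nat.div_lt_self (by omega) (by norm_num)) hqpos]
      conv_rhs => rw [digitsBE_ge_ten h10, leadDigit_ge_ten h10]
      rw [List.any_append]
      cases hA : (digitsBE (m / 10)).any (fun d => decide ((d : Int) = x)) <;>
        by_cases hB : ((m % 10 : Nat) : Int) = x <;> simp [hA, hB]

lemma toDigitsCore_eq : ∀ (fuel m : Nat), m < fuel → ∀ (ds : List Char),
    Nat.toDigitsCore 10 fuel m ds = (digitsBE m).map Nat.digitChar ++ ds := by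
  intro fuel
  induction fuel with
  | zero => omega
  | succ f ihf =>
    intro m hm ds
    simp only [Nat.toDigitsCore]
    by_cases h10 : m < 10
    · have hq : m / 10 = 0 := Nat.div_eq_of_lt h10
      have hr : m % 10 = m := Nat.mod_eq_of_lt h10
      rw [digitsBE, if_pos h10]
      simp [hq, hr]
    · have hq : ¬ (m / 10 = 0) := (Nat.div_pos (by omega) (by norm_num)).ne'
      have hlt : m / 10 < f := by
        have : m / 10 < m := Nat.div_lt_self (by omega) (by norm_num)
        omega
      rw [if_neg (by simpa using hq), ihf (m / 10) hlt]
      rw [digitsBE_ge_ten h10]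
      simp

lemma toChars_natCast (m : Nat) :
    PySem.Int.toChars (m : Int) = (digitsBE m).map Nat.digitChar := by
  rw [PySem.Int.toChars, if_neg (by omega)]
  rw [Nat.toDigits, Int.toNat_natCast, toDigitsCore_eq (m + 1) m (by omega)]
  simp

lemma digitChar_inj : ∀ a, a < 10 → ∀ b, b < 10 → (Nat.digitChar a = Nat.digitChar b ↔ a = b) := by
  decide

lemma singleton_eq_toStr (d : Nat) (hd : d < 10) (x : Int) :
    (String.ofList [Nat.digitChar d] == PySem.Int.toStr x) = decide ((d : Int) = x) := by
  have key : (String.ofList [Nat.digitChar d] = PySem.Int.toStr x) ↔ ((d : Int) = x) := by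
    rw [PySem.Int.toStr]
    constructor
    · intro h
      have h' : [Nat.digitChar d] = PySem.Int.toChars x := by
        have := congrArg String.toList h; simpa using this
      by_cases hx : 0 ≤ x
      · have hxm : x = ((x.toNat : Nat) : Int) := by omega
        rw [hxm, toChars_natCast] at h'
        cases hL : digitsBE x.toNat with
        | nil => exact absurd hL (digitsBE_ne_nil _)
        | cons a l =>
          rw [hL] at h'
          simp only [List.map_cons, List.cons.injEq] at h'
          have hl : l = [] := by
            cases l with
            | nil => rfl
            | cons b t => exact absurd h'.2 (by simp)
          have ha : a < 10 := digitsBE_lt _ a (by rw [hL]; simp)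
          have had : a = d := ((digitChar_inj a ha d hd).mp h'.1.symm)
          have : digitsBE x.toNat = [a] := by rw [hL, hl]
          have := (digitsBE_singleton x.toNat a).mp this
          omega
      · exfalso
        rw [PySem.Int.toChars, if_pos (by omega)] at h'
        injection h' with h1 h2
        revert h1
        interval_cases d <;> decide
    · intro h
      have hd0 : 0 ≤ x := by omega
      have hxm : x = ((x.toNat : Nat) : Int) := by omega
      have hdx : x.toNat = d := by omega
      rw [hxm, toChars_natCast, hdx, digitsBE, if_pos hd]
      simp
  by_cases h : (d : Int) = x <;> simp [h, key]

lemma any_congr_mem {α : Type} (l : List α) (p q : α → Bool)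
    (h : ∀ a ∈ l, p a = q a) : l.any p = l.any q := by
  induction l with
  | nil => rfl
  | cons a l ih =>
    simp only [List.any_cons, h a (by simp)]
    rw [ih (fun b hb => h b (by simp [hb]))]

-- ===== VERDICT (by name: the statement is the Claim_ definition above) =====
theorem validDigit_spec : Claim_equal_validDigit := by
  intro n x _
  show validDigit n x = validDigit_alt n x
  by_cases hn : n ≤ 0
  · rw [validDigit, validDigitLoop, dif_neg (by omega)]
    simp [validDigit_alt, hn]
  · have hm : 0 < n.toNat := by omega
    have hne : n = ((n.toNat : Nat) : Int) := by omega
    obtain ⟨rest, hre⟩ := digitsBE_cons n.toNat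
    have hlead : leadDigit n.toNat < 10 := digitsBE_lt _ _ (by rw [hre]; simp)
    have hrest : ∀ d ∈ rest, d < 10 := fun d hd => digitsBE_lt n.toNat d (by rw [hre]; simp [hd])
    have hBv : validDigit_alt n x
        = (!(decide (((leadDigit n.toNat : Nat) : Int) = x))
            && rest.any (fun d => decide ((d : Int) = x))) := by
      rw [validDigit_alt.eq_def, if_neg hn]
      rw [show (PySem.Int.toStr n).toList
            = Nat.digitChar (leadDigit n.toNat) :: rest.map Nat.digitChar by
          conv_lhs => rw [hne]
          rw [PySem.Int.toStr, String.toList_ofList, toChars_natCast, hre, List.map_cons]]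
      simp only []
      rw [List.any_map]
      rw [any_congr_mem (l := rest)
          (p := (fun d => String.ofList [d] == PySem.Int.toStr x) ∘ Nat.digitChar)
          (q := fun d => decide ((d : Int) = x))
          (fun d hd => singleton_eq_toStr d (hrest d hd) x)]
      rw [bne, singleton_eq_toStr _ hlead x]
    have hloop : validDigitLoop x n (-1) 0
        = ((leadDigit n.toNat : Int),
            if (digitsBE n.toNat).any (fun d => decide ((d : Int) = x)) then 1 else 0) := by
      conv_lhs => rw [hne]
      exact validDigitLoop_eq x n.toNat hm (-1) 0
    rw [hBv, validDigit]
    simp only [hloop, hre, List.any_cons]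
    by_cases hl : ((leadDigit n.toNat : Nat) : Int) = x
    · simp [hl]
    · cases hA : rest.any (fun d => decide ((d : Int) = x)) <;> simp [hl, hA]
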